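-- pv_equiv track=rewrite | github.com/stephenfeather/opc | scripts/core/track_stale_rate.py | _build_upserted_rows
-- ===== SOURCE A (Python) =====
-- def _build_upserted_rows(
--     existing_rows: list[dict[str, str]], new_row: dict[str, str], date_str: str
-- ) -> tuple[list[dict[str, str]], str]:
--     """Collapse duplicates and upsert by date. Returns (rows, action)."""
--     found = False
--     action = "inserted"
--     updated_rows: list[dict[str, str]] = []
--
--     for row in existing_rows:
--         if row.get("date") == date_str:
--             if not found:
--                 found = True
--                 updated_rows.append(new_row)
--                 action = "unchanged" if row == new_row else "updated"
--             # Skip duplicate rows for same date (collapse them)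
--         else:
--             updated_rows.append(row)
--
--     if not found:
--         updated_rows.append(new_row)
--         action = "inserted"
--
--     return updated_rows, action
-- ===== SOURCE B (Python) =====
-- def _build_upserted_rows(
--     existing_rows: list[dict[str, str]], new_row: dict[str, str], date_str: str
-- ) -> tuple[list[dict[str, str]], str]:
--     """Collapse duplicates and upsert by date. Returns (rows, action)."""
--     idx = next((i for i, r in enumerate(existing_rows) if r.get("date") == date_str), None)
--     if idx is None:
--         return existing_rows + [new_row], "inserted"
--     action = "unchanged" if existing_rows[idx] == new_row else "updated"
--     kept = [r for r in existing_rows if r.get("date") != date_str]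
--     kept.insert(idx, new_row)
--     return kept, action
-- ===== Notes on version B (the rewrite author's own statement) =====
-- stated objective: simpler
-- what changed: Replaces the stateful single loop (found flag, action and accumulator mutated in step) with a declarative decomposition: locate the first matching index, filter out all matching rows, and insert the new row at that index.
import Mathlib
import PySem

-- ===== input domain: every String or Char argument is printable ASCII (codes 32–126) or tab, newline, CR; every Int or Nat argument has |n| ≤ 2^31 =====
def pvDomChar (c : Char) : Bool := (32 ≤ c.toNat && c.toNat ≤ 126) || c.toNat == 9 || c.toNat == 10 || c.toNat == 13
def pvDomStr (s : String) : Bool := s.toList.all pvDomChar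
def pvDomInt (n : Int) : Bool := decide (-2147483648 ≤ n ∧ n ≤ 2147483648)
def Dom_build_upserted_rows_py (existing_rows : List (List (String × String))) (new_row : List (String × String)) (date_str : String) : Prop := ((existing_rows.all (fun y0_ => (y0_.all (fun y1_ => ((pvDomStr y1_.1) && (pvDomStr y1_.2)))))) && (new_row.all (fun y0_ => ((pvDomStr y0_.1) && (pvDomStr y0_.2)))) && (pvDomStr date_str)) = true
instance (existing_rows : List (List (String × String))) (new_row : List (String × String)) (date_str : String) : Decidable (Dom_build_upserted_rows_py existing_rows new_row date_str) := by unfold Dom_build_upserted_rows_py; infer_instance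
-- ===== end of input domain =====

-- B replaces A's stateful single loop (found flag + mutated action/accumulator) by a
-- declarative decomposition: find the first matching index, filter out all matches,
-- insert the new row at that index ("simpler"; same O(n) cost).


-- Shared Python-dict primitives (rows are dicts in Python): d.get(k) = first-match
-- lookup, and Python's dict == ignores insertion order — both ports use these, exact
-- on assoc lists that represent dicts (unique keys; the convention's dict encoding).
def pyDictGet (row : List (String × String)) (k : String) : Option String :=
  (row.find? (fun p => p.1 == k)).map (·.2)

def pyDictEq (a b : List (String × String)) : Bool :=
  a.all (fun p => pyDictGet b p.1 == pyDictGet a p.1) &&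
  b.all (fun p => pyDictGet a p.1 == pyDictGet b p.1)

-- ===== PORT A =====
-- the for-loop of A, state (found, action, updated_rows)
def loopA (rows : List (List (String × String))) (new_row : List (String × String))
    (date_str : String) (found : Bool) (action : String)
    (upd : List (List (String × String))) : Bool × String × List (List (String × String)) :=
  match rows with
  | [] => (found, action, upd)
  | row :: rest =>
    if pyDictGet row "date" == some date_str then
      if !found then
        loopA rest new_row date_str true
          (if pyDictEq row new_row then "unchanged" else "updated") (upd ++ [new_row])
      else loopA rest new_row date_str found action upd
    else loopA rest new_row date_str found action (upd ++ [row])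

def build_upserted_rows_py (existing_rows : List (List (String × String))) (new_row : List (String × String)) (date_str : String) : (List (List (String × String))) × String :=
  let st := loopA existing_rows new_row date_str false "inserted" []
  if !st.1 then (st.2.2 ++ [new_row], "inserted") else (st.2.2, st.2.1)

-- ===== PORT B =====
def build_upserted_rows_py_alt (existing_rows : List (List (String × String))) (new_row : List (String × String)) (date_str : String) : (List (List (String × String))) × String :=
  match existing_rows.findIdx? (fun r => pyDictGet r "date" == some date_str) with
  | none => (existing_rows ++ [new_row], "inserted")
  | some idx =>
    let action := if pyDictEq (existing_rows.getD idx []) new_row then "unchanged" else "updated"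
    let kept := existing_rows.filter (fun r => !(pyDictGet r "date" == some date_str))
    (PySem.List.insert kept (idx : Int) new_row, action)

-- ===== PRECONDITION & SPEC =====
def Spec_build_upserted_rows_py (existing_rows : List (List (String × String))) (new_row : List (String × String)) (date_str : String) (out : (List (List (String × String))) × String) : Prop := out = build_upserted_rows_py_alt existing_rows new_row date_str
instance (existing_rows : List (List (String × String))) (new_row : List (String × String)) (date_str : String) (out : (List (List (String × String))) × String) : Decidable (Spec_build_upserted_rows_py existing_rows new_row date_str out) := by unfold Spec_build_upserted_rows_py; infer_instance

-- ===== CLAIM (what is proved, stated in full; the proofs are below) =====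
def Claim_equal_build_upserted_rows_py : Prop := ∀ (existing_rows : List (List (String × String))) (new_row : List (String × String)) (date_str : String), Dom_build_upserted_rows_py existing_rows new_row date_str → Spec_build_upserted_rows_py existing_rows new_row date_str (build_upserted_rows_py existing_rows new_row date_str)

-- ===== LEMMAS AND PROOFS =====

-- once found, the loop only appends the non-matching remainder
theorem loopA_found (rows : List (List (String × String))) (new_row : List (String × String))
    (date_str : String) (action : String) (upd : List (List (String × String))) :
    loopA rows new_row date_str true action upd =
      (true, action, upd ++ rows.filter (fun r => !(pyDictGet r "date" == some date_str))) := by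
  induction rows generalizing upd with
  | nil => simp [loopA]
  | cons r rest ih =>
    by_cases h : (pyDictGet r "date" == some date_str) = true <;>
      simp [loopA, h, ih]

-- the first match index is at most the number of non-matching rows
theorem findIdx_le_filter (p : List (String × String) → Bool)
    (rows : List (List (String × String))) (j : ℕ)
    (h : rows.findIdx? p = some j) : j ≤ (rows.filter (fun r => !p r)).length := by
  induction rows generalizing j with
  | nil => simp [List.findIdx?, List.findIdx?.go] at h
  | cons r rest ih =>
    rw [List.findIdx?_cons] at h
    by_cases hp : p r = true
    · simp [hp] at h; omega
    · simp [hp] at h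
      obtain ⟨j', hj', rfl⟩ := h
      have := ih j' hj'
      simp [hp]
      omega

-- the loop started not-found, followed by A's final fixup, equals B's find/filter/insert form
theorem main_aux (rows : List (List (String × String))) (new_row : List (String × String))
    (date_str : String) (upd : List (List (String × String))) :
    (let st := loopA rows new_row date_str false "inserted" upd
     if !st.1 then (st.2.2 ++ [new_row], "inserted") else (st.2.2, st.2.1))
    = (match rows.findIdx? (fun r => pyDictGet r "date" == some date_str) with
       | none => (upd ++ (rows ++ [new_row]), "inserted")
       | some idx =>
         (upd ++ PySem.List.insert
             (rows.filter (fun r => !(pyDictGet r "date" == some date_str))) (idx : Int) new_row,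
          if pyDictEq (rows.getD idx []) new_row then "unchanged" else "updated")) := by
  induction rows generalizing upd with
  | nil => simp [loopA, List.findIdx?, List.findIdx?.go]
  | cons r rest ih =>
    rw [List.findIdx?_cons]
    by_cases h : (pyDictGet r "date" == some date_str) = true
    · -- head matches: found at index 0
      have hstep : loopA (r :: rest) new_row date_str false "inserted" upd
          = loopA rest new_row date_str true
              (if pyDictEq r new_row then "unchanged" else "updated") (upd ++ [new_row]) := by
        simp [loopA, h]
      rw [hstep, loopA_found]
      simp [h, PySem.List.insert_zero]
    · -- head does not match
      have hstep : loopA (r :: rest) new_row date_str false "inserted" upd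
          = loopA rest new_row date_str false "inserted" (upd ++ [r]) := by
        simp [loopA, h]
      rw [hstep, ih (upd ++ [r])]
      cases hfi : rest.findIdx? (fun r => pyDictGet r "date" == some date_str) with
      | none => simp [h]
      | some j =>
        have hle := findIdx_le_filter _ rest j hfi
        have h1 : PySem.List.insert
            (r :: rest.filter (fun r => !(pyDictGet r "date" == some date_str)))
            ((j : Int) + 1) new_row
          = r :: PySem.List.insert
              (rest.filter (fun r => !(pyDictGet r "date" == some date_str))) (j : Int) new_row := by
          rw [show ((j : Int) + 1) = ((j + 1 : ℕ) : Int) by push_cast; ring]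
          rw [PySem.List.insert_natCast _ (j+1) _ (by simp; omega),
              PySem.List.insert_natCast _ j _ hle]
          simp
        simp [h]
        exact h1.symm

-- ===== VERDICT (by name: the statement is the Claim_ definition above) =====
theorem build_upserted_rows_py_spec : Claim_equal_build_upserted_rows_py := by
  intro existing_rows new_row date_str _
  unfold Spec_build_upserted_rows_py build_upserted_rows_py build_upserted_rows_py_alt
  rw [main_aux]
  cases h : existing_rows.findIdx? (fun r => pyDictGet r "date" == some date_str) <;> simp
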